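-- pv_equiv track=rewrite | github.com/santi/challenges | advent-of-code/2023/day12/hot_springs.py | is_valid_damage_group
-- ===== SOURCE A (Python) =====
-- def get_next_record(conditions: str, current_damage_group: int) -> str:
--     if current_damage_group >= len(conditions):
--         return "."
--     else:
--         return conditions[current_damage_group]
--
-- def is_valid_damage_group(conditions: str, damage_group: int) -> bool:
--     records = conditions[:damage_group]
--     next_record = get_next_record(conditions, damage_group)
--     return (
--         len(records) == damage_group
--         and all([condition in {"#", "?"} for condition in records])
--         and next_record in {".", "?"}
--     )
-- ===== SOURCE B (Python) =====
-- def is_valid_damage_group(conditions: str, damage_group: int) -> bool: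
--     # One recursive pass over the string: peel one '#'/'?' per unit of damage_group,
--     # then demand end-of-string or a '.'/'?' separator. No slicing, no helper.
--     if damage_group < 0:
--         return False
--     if damage_group == 0:
--         return conditions == "" or conditions[0] in ".?"
--     if conditions == "" or conditions[0] not in "#?":
--         return False
--     return is_valid_damage_group(conditions[1:], damage_group - 1)
-- ===== Notes on version B (the rewrite author's own statement) =====
-- stated objective: simpler
-- what changed: A slices the prefix, checks its length, runs all() over a full set-membership list comprehension and asks a helper for the following character; B is a single self-recursive pass that peels one '#'/'?' per unit of damage_group and checks end-of-string or a '.'/'?' separator — no slicing, no intermediate list, no helper, and it stops at the first bad character.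
import Mathlib
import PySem

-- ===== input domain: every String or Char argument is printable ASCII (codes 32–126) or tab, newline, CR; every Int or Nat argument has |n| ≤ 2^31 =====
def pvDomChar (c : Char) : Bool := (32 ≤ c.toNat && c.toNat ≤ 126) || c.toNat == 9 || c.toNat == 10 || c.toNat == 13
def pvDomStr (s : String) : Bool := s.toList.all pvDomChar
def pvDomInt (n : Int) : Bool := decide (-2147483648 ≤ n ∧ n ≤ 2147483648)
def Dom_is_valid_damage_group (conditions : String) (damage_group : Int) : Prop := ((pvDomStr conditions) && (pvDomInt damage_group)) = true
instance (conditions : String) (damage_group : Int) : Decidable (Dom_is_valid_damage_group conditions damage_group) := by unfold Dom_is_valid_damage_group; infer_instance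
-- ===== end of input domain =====

-- B replaces A's slice/len/all/helper pipeline by a single recursive peel of the prefix (simpler: one pass, no helper).

-- ===== PORT A =====
def get_next_record (conditions : String) (current_damage_group : Int) : Char :=
  if current_damage_group ≥ PySem.Str.len conditions then '.'
  else (PySem.Str.pyGet? conditions current_damage_group).getD '.'
  -- the .getD default is unreachable under Pre_ (pyGet? = none exactly when current_damage_group < -len, the IndexError Pre_ excludes)

def is_valid_damage_group (conditions : String) (damage_group : Int) : Bool :=
  let records := PySem.Str.slice conditions none (some damage_group)
  let next_record := get_next_record conditions damage_group
  (PySem.Str.len records == damage_group)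
    && (records.toList.all fun condition => condition == '#' || condition == '?')
    && (next_record == '.' || next_record == '?')

-- ===== PORT B =====
def altGo (cs : List Char) (g : Int) : Bool :=
  if g < 0 then false
  else if g = 0 then
    match cs with
    | [] => true
    | c :: _ => c == '.' || c == '?'
  else
    match cs with
    | [] => false
    | c :: rest => (c == '#' || c == '?') && altGo rest (g - 1)
termination_by structural cs

def is_valid_damage_group_alt (conditions : String) (damage_group : Int) : Bool :=
  altGo conditions.toList damage_group

-- ===== PRECONDITION & SPEC =====
-- Pre_ excludes exactly the inputs where A raises IndexError (damage_group < -len(conditions)).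
def Pre_is_valid_damage_group (conditions : String) (damage_group : Int) : Prop :=
  -(PySem.Str.len conditions) ≤ damage_group
instance (conditions : String) (damage_group : Int) : Decidable (Pre_is_valid_damage_group conditions damage_group) := by unfold Pre_is_valid_damage_group; infer_instance
def pvWitness_is_valid_damage_group : String × Int := ("#?#", 2)

def Spec_is_valid_damage_group (conditions : String) (damage_group : Int) (out : Bool) : Prop := out = is_valid_damage_group_alt conditions damage_group
instance (conditions : String) (damage_group : Int) (out : Bool) : Decidable (Spec_is_valid_damage_group conditions damage_group out) := by unfold Spec_is_valid_damage_group; infer_instance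

-- ===== CLAIM (what is proved, stated in full; the proofs are below) =====
def Claim_equal_is_valid_damage_group : Prop := ∀ (conditions : String) (damage_group : Int), Dom_is_valid_damage_group conditions damage_group → Pre_is_valid_damage_group conditions damage_group → Spec_is_valid_damage_group conditions damage_group (is_valid_damage_group conditions damage_group)

-- ===== LEMMAS AND PROOFS =====

-- A's body, expressed over the character list (proof-side mirror of port A).
def aList (cs : List Char) (g : Int) : Bool :=
  let records := PySem.List.slice cs none (some g)
  let next := if g ≥ (cs.length : Int) then '.' else (PySem.List.pyGet? cs g).getD '.'
  (PySem.List.len records == g)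
    && (records.all fun condition => condition == '#' || condition == '?')
    && (next == '.' || next == '?')

lemma A_eq_aList (s : String) (g : Int) :
    is_valid_damage_group s g = aList s.toList g := by
  simp [is_valid_damage_group, get_next_record, aList, pysem]

lemma aList_eq_altGo_nat (cs : List Char) (k : Nat) :
    aList cs (k : Int) = altGo cs (k : Int) := by
  induction cs generalizing k with
  | nil =>
    cases k with
    | zero => simp [aList, altGo, pysem]
    | succ k =>
      rw [altGo]
      have h1 : ((0:Int) == ((k:Int)+1)) = false := beq_eq_false_iff_ne.mpr (by omega)
      simp [aList, pysem, h1, decide_eq_false (show ¬((k:Int)+1 = 0) by omega)]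
  | cons c rest ih =>
    cases k with
    | zero =>
      simp [aList, altGo, pysem]
      rw [if_neg (by omega : ¬((rest.length:Int) < 0))]
    | succ k =>
      rw [altGo]
      rw [if_neg (by omega : ¬(((k+1:Nat)):Int) < 0), if_neg (by omega : ¬(((k+1:Nat):Int) = 0))]
      rw [(by omega : ((k + 1 : Nat) : Int) - 1 = (k : Int)), ← ih k]
      rw [aList, aList]
      simp only [pysem, PySem.List.slice_to_natCast, List.take_succ_cons,
        PySem.List.pyGet?_natCast, List.length_cons, List.getElem?_cons_succ]
      have e1 : ((((List.take k rest).length + 1 : Nat) : Int) == ((k+1 : Nat) : Int))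
          = (((List.take k rest).length : Int) == (k : Int)) := by
        rcases eq_or_ne (List.take k rest).length k with h | h
        · rw [h]; simp
        · rw [beq_eq_false_iff_ne.mpr (by omega : (((List.take k rest).length + 1 : Nat) : Int) ≠ ((k+1:Nat):Int)),
              beq_eq_false_iff_ne.mpr (by omega : (((List.take k rest).length : Nat) : Int) ≠ (k:Int))]
      have e2 : (if (((k+1:Nat)):Int) ≥ ((rest.length + 1 : Nat) : Int) then '.' else rest[k]?.getD '.')
          = (if ((k:Nat):Int) ≥ ((rest.length:Nat):Int) then '.' else rest[k]?.getD '.') :=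
        if_congr (by omega) rfl rfl
      rw [e1, e2]
      simp only [List.all_cons]
      cases hA : (((List.take k rest).length : Int) == (k : Int)) <;>
        cases hAll : (List.take k rest).all (fun condition => condition == '#' || condition == '?') <;>
        cases hc : (c == '#' || c == '?') <;> simp_all

lemma aList_eq_altGo (cs : List Char) (g : Int) (h : -(cs.length : Int) ≤ g) :
    aList cs g = altGo cs g := by
  by_cases hg : g < 0
  · have hne : (((PySem.List.slice cs none (some g)).length : Int)) ≠ g := by
      have : (0 : Int) ≤ ((PySem.List.slice cs none (some g)).length : Int) := by positivity
      omega
    rw [altGo.eq_def]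
    simp [aList, pysem, hg, hne]
  · obtain ⟨k, rfl⟩ : ∃ k : Nat, g = (k : Int) :=
      ⟨g.toNat, (Int.toNat_of_nonneg (by omega)).symm⟩
    exact aList_eq_altGo_nat cs k

-- ===== VERDICT (by name: the statement is the Claim_ definition above) =====
theorem is_valid_damage_group_spec : Claim_equal_is_valid_damage_group := by
  intro conditions damage_group _ hpre
  unfold Spec_is_valid_damage_group is_valid_damage_group_alt
  rw [A_eq_aList]
  exact aList_eq_altGo _ _ (by simpa [pysem, PySem.Str.len_eq] using hpre)
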